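-- pv_equiv track=rewrite | github.com/suhrob-panjiyev/Lug-at-Pro | pages/student_core.py | suggestions
-- ===== SOURCE A (Python) =====
-- from typing import Optional, List
--
-- def norm_en(s: str) -> str:
--     return " ".join(s.strip().lower().split())
--
-- def suggestions(query: str, english_list: List[str], limit: int = 16):
--     q = norm_en(query)
--     if not q:
--         return []
--     starts = [w for w in english_list if w.lower().startswith(q)]
--     if len(starts) >= limit:
--         return starts[:limit]
--     contains = [w for w in english_list if q in w.lower() and w not in starts]
--     return (starts + contains)[:limit]
-- ===== SOURCE B (Python) =====
-- from typing import List
--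
-- def norm_en(s: str) -> str:
--     return " ".join(s.strip().lower().split())
--
-- def suggestions(query: str, english_list: List[str], limit: int = 16):
--     q = norm_en(query)
--     if not q:
--         return []
--     starts, contains = [], []
--     for w in english_list:
--         wl = w.lower()
--         if wl.startswith(q):
--             starts.append(w)
--         elif q in wl:
--             contains.append(w)
--     if len(starts) >= limit:
--         return starts[:limit]
--     return (starts + contains)[:limit]
-- ===== Notes on version B (the rewrite author's own statement) =====
-- stated objective: alternative
-- what changed: A scans english_list twice (a prefix comprehension, then a substring comprehension whose 'w not in starts' test rescans the starts list for every word); B makes one pass that lowercases each word once and classifies it into a starts or contains bucket, removing the second scan and the membership rescan (measured ~1.3x, below the 1.5x bar, so not claimed as faster).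
import Mathlib
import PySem

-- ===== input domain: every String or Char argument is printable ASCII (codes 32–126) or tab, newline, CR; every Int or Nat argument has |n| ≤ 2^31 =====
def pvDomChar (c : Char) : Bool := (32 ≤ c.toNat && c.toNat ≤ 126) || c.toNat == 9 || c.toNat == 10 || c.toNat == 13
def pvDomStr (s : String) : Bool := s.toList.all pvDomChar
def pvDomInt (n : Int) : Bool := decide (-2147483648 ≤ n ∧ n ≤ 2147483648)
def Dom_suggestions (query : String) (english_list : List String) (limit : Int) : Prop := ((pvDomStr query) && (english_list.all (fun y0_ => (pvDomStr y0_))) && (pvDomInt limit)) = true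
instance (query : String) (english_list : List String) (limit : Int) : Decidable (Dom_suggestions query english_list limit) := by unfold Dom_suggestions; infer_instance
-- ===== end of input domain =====

-- B replaces A's two comprehension scans (and the per-word rescan of `starts`) by one
-- classifying pass into two buckets; same return value, single traversal (objective: alternative).

-- ===== PORT A =====
-- norm_en(s) = " ".join(s.strip().lower().split())
def normEn (s : String) : String :=
  PySem.Str.join " " (PySem.Str.split₀ (PySem.Str.lower (PySem.Str.strip s)))

def suggestions (query : String) (english_list : List String) (limit : Int) : List String :=
  let q := normEn query
  if q = "" then []
  else
    let starts := english_list.filter (fun w => PySem.Str.startswith (PySem.Str.lower w) q)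
    if limit ≤ (starts.length : Int) then PySem.List.slice starts none (some limit)
    else
      let contains := english_list.filter
        (fun w => PySem.Str.isIn q (PySem.Str.lower w) && !(starts.contains w))
      PySem.List.slice (starts ++ contains) none (some limit)

-- ===== PORT B =====
def suggestions_alt (query : String) (english_list : List String) (limit : Int) : List String :=
  let q := normEn query
  if q = "" then []
  else
    let sc := english_list.foldl
      (fun (sc : List String × List String) w =>
        let wl := PySem.Str.lower w
        if PySem.Str.startswith wl q then (sc.1 ++ [w], sc.2)
        else if PySem.Str.isIn q wl then (sc.1, sc.2 ++ [w])
        else sc)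
      ([], [])
    if limit ≤ (sc.1.length : Int) then PySem.List.slice sc.1 none (some limit)
    else PySem.List.slice (sc.1 ++ sc.2) none (some limit)

-- ===== PRECONDITION & SPEC =====
def Spec_suggestions (query : String) (english_list : List String) (limit : Int) (out : List String) : Prop := out = suggestions_alt query english_list limit
instance (query : String) (english_list : List String) (limit : Int) (out : List String) : Decidable (Spec_suggestions query english_list limit out) := by unfold Spec_suggestions; infer_instance

-- ===== CLAIM (what is proved, stated in full; the proofs are below) =====
def Claim_equal_suggestions : Prop := ∀ (query : String) (english_list : List String) (limit : Int), Dom_suggestions query english_list limit → Spec_suggestions query english_list limit (suggestions query english_list limit)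

-- ===== LEMMAS AND PROOFS =====

-- B's classifying fold produces the two filters (appended behind the accumulators).
theorem foldl_classify {α : Type} (p r : α → Bool) (l : List α) (s c : List α) :
    l.foldl
      (fun (sc : List α × List α) w =>
        if p w then (sc.1 ++ [w], sc.2)
        else if r w then (sc.1, sc.2 ++ [w])
        else sc)
      (s, c)
    = (s ++ l.filter p, c ++ l.filter (fun w => r w && !p w)) := by
  induction l generalizing s c with
  | nil => simp
  | cons w l ih =>
    by_cases hp : p w
    · simp [List.foldl_cons, hp, ih]
    · by_cases hr : r w <;> simp [List.foldl_cons, hp, hr, ih]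

-- For w drawn from the list, membership in `l.filter p` is exactly `p w`
-- (A's `w not in starts` is `not w.lower().startswith(q)`).
theorem contains_filter_self {α : Type} [DecidableEq α] (p : α → Bool) (l : List α)
    (w : α) (hw : w ∈ l) : (l.filter p).contains w = p w := by
  by_cases h : p w
  · simp [List.mem_filter, hw, h]
  · simp [List.mem_filter, h]

-- A's `contains` filter equals B's pure-predicate filter.
theorem contains_filter_eq {α : Type} [DecidableEq α] (p r : α → Bool) (l : List α) :
    l.filter (fun w => r w && !((l.filter p).contains w))
    = l.filter (fun w => r w && !(p w)) := by
  apply List.filter_congr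
  intro w hw
  rw [contains_filter_self p l w hw]

-- ===== VERDICT (by name: the statement is the Claim_ definition above) =====
theorem suggestions_spec : Claim_equal_suggestions := by
  intro query english_list limit _
  unfold Spec_suggestions suggestions suggestions_alt
  by_cases hq : normEn query = ""
  · simp [hq]
  · simp only [hq, if_false]
    rw [foldl_classify]
    simp only [List.nil_append]
    rw [contains_filter_eq]
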